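-- pv_equiv track=rewrite | github.com/turvik0/algorithms_mipt | week7_8/20.py | gtpktspectrl
-- ===== SOURCE A (Python) =====
-- def gtpktspectrl(spectrr):
--     dctconvo = {}
--     spectrr = sorted(spectrr)
--     for i in range(len(spectrr) - 1):
--         for j in range(i, len(spectrr)):
--             mass = spectrr[j] - spectrr[i]
--             if mass < 57 or mass > 200:
--                 continue
--             if mass in dctconvo:
--                 dctconvo[mass] += 1
--             else:
--                 dctconvo[mass] = 1
--     return dctconvo
-- ===== SOURCE B (Python) =====
-- def gtpktspectrl(spectrr):
--     # Frequency map over values, then scan offsets 57..200 per distinct value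
--     # (ascending), so the insertion order of masses matches A's pair scan.
--     freq = {}
--     for v in spectrr:
--         freq[v] = freq.get(v, 0) + 1
--     dctconvo = {}
--     for v in sorted(freq):
--         fv = freq[v]
--         for mass in range(57, 201):
--             w = freq.get(v + mass)
--             if w is not None:
--                 dctconvo[mass] = dctconvo.get(mass, 0) + fv * w
--     return dctconvo
-- ===== Notes on version B (the rewrite author's own statement) =====
-- stated objective: faster
-- what changed: A scans all O(n^2) index pairs of the sorted spectrum; B builds a value-frequency dict once and, for each distinct value in ascending order, scans only the 144 admissible mass offsets 57..200, adding freq[v]*freq[v+m] per hit, which reproduces A's dict contents and insertion order.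
import Mathlib
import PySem

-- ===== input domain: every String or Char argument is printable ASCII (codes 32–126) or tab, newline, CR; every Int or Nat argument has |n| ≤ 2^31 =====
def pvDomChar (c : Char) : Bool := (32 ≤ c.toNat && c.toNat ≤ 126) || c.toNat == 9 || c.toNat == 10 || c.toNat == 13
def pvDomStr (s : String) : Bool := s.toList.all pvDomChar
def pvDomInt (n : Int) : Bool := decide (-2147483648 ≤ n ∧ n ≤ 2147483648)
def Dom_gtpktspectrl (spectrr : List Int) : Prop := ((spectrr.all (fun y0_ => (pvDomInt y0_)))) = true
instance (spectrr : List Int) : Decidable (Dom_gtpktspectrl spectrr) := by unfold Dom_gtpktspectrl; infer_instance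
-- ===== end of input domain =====

-- B replaces A's quadratic scan over all index pairs of the sorted spectrum by a value-frequency
-- map scanned per distinct value over the 144 admissible mass offsets 57..200 (objective: faster).

-- ===== PORT A =====
def gtpktspectrl (spectrr : List Int) : List (Int × Int) :=
  let dctconvo : PySem.Dict Int Int := PySem.Dict.empty
  let spectrr2 := PySem.List.sorted spectrr (fun x => x) false
  let d := (PySem.List.pyRange 0 (PySem.List.len spectrr2 - 1) 1).foldl (fun d i =>
    (PySem.List.pyRange i (PySem.List.len spectrr2) 1).foldl (fun d j =>
      let mass := PySem.List.pyGetD spectrr2 j 0 - PySem.List.pyGetD spectrr2 i 0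
      if mass < 57 ∨ mass > 200 then d
      else if d.contains mass then d.insert mass (d.getD mass 0 + 1)
      else d.insert mass 1) d) dctconvo
  d.items

-- ===== PORT B =====
def gtpktspectrl_alt (spectrr : List Int) : List (Int × Int) :=
  let freq : PySem.Dict Int Int :=
    spectrr.foldl (fun d v => d.insert v (d.getD v 0 + 1)) PySem.Dict.empty
  let d := (PySem.List.sorted freq.keys (fun x => x) false).foldl (fun d v =>
    let fv := freq.getD v 0
    (PySem.List.pyRange 57 201 1).foldl (fun d mass =>
      match freq.get? (v + mass) with
      | none => d
      | some w => d.insert mass (d.getD mass 0 + fv * w)) d) PySem.Dict.empty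
  d.items

-- ===== PRECONDITION & SPEC =====
def Spec_gtpktspectrl (spectrr : List Int) (out : List (Int × Int)) : Prop := out = gtpktspectrl_alt spectrr
instance (spectrr : List Int) (out : List (Int × Int)) : Decidable (Spec_gtpktspectrl spectrr out) := by unfold Spec_gtpktspectrl; infer_instance

-- ===== CLAIM (what is proved, stated in full; the proofs are below) =====
def Claim_equal_gtpktspectrl : Prop := ∀ (spectrr : List Int), Dom_gtpktspectrl spectrr → Spec_gtpktspectrl spectrr (gtpktspectrl spectrr)

-- ===== LEMMAS AND PROOFS =====

-- a "bump" stream: fold adding p.2 to the dict value at key p.1 (both ports reduce to this)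
def pvBump (d : PySem.Dict Int Int) (L : List (Int × Int)) : PySem.Dict Int Int :=
  L.foldl (fun d p => d.insert p.1 (d.getD p.1 0 + p.2)) d

-- total weight contributed to key k by the stream
def pvWgt (L : List (Int × Int)) (k : Int) : Int :=
  ((L.filter (fun p => p.1 == k)).map (·.2)).sum

abbrev pvInR (m : Int) : Prop := 57 ≤ m ∧ m ≤ 200

-- A's per-i mass block over the sorted list s
def pvMassesA (s : List Int) (i : Int) : List Int :=
  ((PySem.List.pyRange i (PySem.List.len s) 1).filter
      (fun j => decide (pvInR (PySem.List.pyGetD s j 0 - PySem.List.pyGetD s i 0)))).map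
    (fun j => PySem.List.pyGetD s j 0 - PySem.List.pyGetD s i 0)

def pvLA (s : List Int) : List (Int × Int) :=
  (PySem.List.pyRange 0 (PySem.List.len s - 1) 1).flatMap
    (fun i => (pvMassesA s i).map (fun m => (m, (1 : Int))))

-- B's per-value mass block, phrased over membership in s
def pvF (s : List Int) (v : Int) : List Int :=
  (PySem.List.pyRange 57 201 1).filter (fun m => decide ((v + m) ∈ s))

def pvCnt (s : List Int) (v : Int) : Int := (s.count v : Int)

def pvLB (s : List Int) : List (Int × Int) :=
  (PySem.Set.ofList s).flatMap
    (fun v => (pvF s v).map (fun m => (m, pvCnt s v * pvCnt s (v + m))))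

lemma pvBump_getD (L : List (Int × Int)) (d : PySem.Dict Int Int) (k : Int) :
    (pvBump d L).getD k 0 = d.getD k 0 + pvWgt L k := by
  induction L generalizing d with
  | nil => simp [pvBump, pvWgt]
  | cons p L ih =>
    simp only [pvBump, List.foldl_cons] at *
    rw [ih]
    simp only [pvWgt, List.filter_cons]
    by_cases h : p.1 = k
    · subst h
      simp
      ring_nf
    · simp [PySem.Dict.getD_insert, h, Ne.symm h]

lemma pvBump_items (L : List (Int × Int)) :
    (pvBump PySem.Dict.empty L).items
      = (PySem.Set.ofList (L.map Prod.fst)).map (fun k => (k, pvWgt L k)) := by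
  have hnd : (pvBump PySem.Dict.empty L).keys.Nodup := by
    apply PySem.Dict.nodup_keys_foldl_insert_key L Prod.fst
      (fun d p => d.getD p.1 0 + p.2) PySem.Dict.empty
    simp [PySem.Dict.keys_empty]
  have hkeys : (pvBump PySem.Dict.empty L).keys = PySem.Set.ofList (L.map Prod.fst) := by
    have := PySem.Dict.keys_foldl_insert_key L Prod.fst
      (fun d p => d.getD p.1 0 + p.2) PySem.Dict.empty
    simpa [PySem.Dict.keys_empty, PySem.Set.update_empty] using this
  rw [PySem.Dict.items_eq_map_keys _ hnd 0, hkeys]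
  apply List.map_congr_left
  intro k hk
  rw [pvBump_getD]
  simp [PySem.Dict.getD_empty]

lemma pvBump_flatMap {β : Type} (is : List β) (g : β → List (Int × Int)) (d : PySem.Dict Int Int) :
    is.foldl (fun d i => pvBump d (g i)) d = pvBump d (is.flatMap g) := by
  induction is generalizing d with
  | nil => simp [pvBump]
  | cons i is ih => simp [List.flatMap_cons, pvBump, List.foldl_append] at *; rw [ih]

lemma pvOfList_sublist (xs : List Int) : (PySem.Set.ofList xs).Sublist xs := by
  induction xs using List.reverseRecOn with
  | nil => simp [PySem.Set.ofList]
  | append_singleton xs x ih =>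
    rw [PySem.Set.ofList_append_singleton]
    by_cases h : x ∈ PySem.Set.ofList xs
    · rw [PySem.Set.add_of_mem h]
      exact ih.trans (List.sublist_append_left xs [x])
    · rw [PySem.Set.add_of_not_mem h]
      exact List.Sublist.append ih (List.Sublist.refl [x])

lemma pvEq_of_perm_lt (l₁ l₂ : List Int) (hp : l₁.Perm l₂)
    (h₁ : l₁.Pairwise (· < ·)) (h₂ : l₂.Pairwise (· < ·)) : l₁ = l₂ := by
  have a1 := PySem.List.sorted_eq_of_perm_of_pairwise_lt l₂ l₁ (fun x => x) hp h₁
  have a2 := PySem.List.sorted_eq_of_perm_of_pairwise_lt l₂ l₂ (fun x => x) (List.Perm.refl _) h₂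
  exact a1.symm.trans a2

lemma pvPairwise_lt_of_le_nodup (l : List Int) (h : l.Pairwise (· ≤ ·)) (hn : l.Nodup) :
    l.Pairwise (· < ·) := by
  have := List.Pairwise.and h hn
  exact this.imp (fun hab => lt_of_le_of_ne hab.1 hab.2)

-- monotone access into a (≤)-sorted list
lemma pvSorted_getD_mono (s : List Int) (hs : s.Pairwise (· ≤ ·)) (i j : Int)
    (h0 : 0 ≤ i) (hij : i ≤ j) (hj : j < (s.length : Int)) :
    PySem.List.pyGetD s i 0 ≤ PySem.List.pyGetD s j 0 := by
  rw [PySem.List.pyGetD_eq_getElem s 0 h0 (lt_of_le_of_lt hij hj),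
      PySem.List.pyGetD_eq_getElem s 0 (le_trans h0 hij) hj]
  have hij' : i.toNat ≤ j.toNat := by omega
  rcases Nat.eq_or_lt_of_le hij' with he | hl
  · simp [he]
  · exact (List.pairwise_iff_getElem.mp hs) _ _ _ (by omega) hl
lemma pvMem_massesA (s : List Int) (hs : s.Pairwise (· ≤ ·)) (i : Int)
    (h0 : 0 ≤ i) (h1 : i < (s.length : Int)) (m : Int) :
    m ∈ pvMassesA s i ↔ pvInR m ∧ (PySem.List.pyGetD s i 0 + m) ∈ s := by
  simp only [pvMassesA, List.mem_map, List.mem_filter, PySem.List.mem_pyRange_one,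
    decide_eq_true_eq, PySem.List.len_eq]
  constructor
  · rintro ⟨j, ⟨⟨hij, hjn⟩, hin⟩, rfl⟩
    refine ⟨hin, ?_⟩
    have h0j : 0 ≤ j := le_trans h0 hij
    have heq : PySem.List.pyGetD s i 0 +
        (PySem.List.pyGetD s j 0 - PySem.List.pyGetD s i 0) = PySem.List.pyGetD s j 0 := by ring
    rw [heq, PySem.List.pyGetD_eq_getElem s 0 h0j hjn]
    exact List.getElem_mem _
  · rintro ⟨hm, hmem⟩
    obtain ⟨t, ht, hst⟩ := List.mem_iff_getElem.mp hmem
    have hgt : PySem.List.pyGetD s (t : Int) 0 = s[t] := by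
      rw [PySem.List.pyGetD_eq_getElem s 0 (by omega) (by exact_mod_cast ht)]
      simp
    have hit : i ≤ (t : Int) := by
      by_contra hc
      have h2 : s[t] ≤ s[i.toNat] := by
        rcases Nat.eq_or_lt_of_le (show t ≤ i.toNat by omega) with he | hl
        · simp [he]
        · exact (List.pairwise_iff_getElem.mp hs) _ _ _ (by omega) hl
      rw [PySem.List.pyGetD_eq_getElem s 0 h0 h1] at hst
      have h57 : (57 : Int) ≤ m := hm.1
      omega
    refine ⟨(t : Int), ⟨⟨hit, by exact_mod_cast ht⟩, ?_⟩, ?_⟩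
    · rw [hgt, hst, PySem.List.pyGetD_eq_getElem s 0 h0 h1]
      have he : s[i.toNat] + m - s[i.toNat] = m := by ring
      rw [he]; exact hm
    · rw [hgt, hst, PySem.List.pyGetD_eq_getElem s 0 h0 h1]
      ring
lemma pvMem_F (s : List Int) (v m : Int) : m ∈ pvF s v ↔ pvInR m ∧ (v + m) ∈ s := by
  simp only [pvF, List.mem_filter, PySem.List.mem_pyRange_one, decide_eq_true_eq, pvInR]
  constructor
  · rintro ⟨⟨h1, h2⟩, h3⟩; exact ⟨⟨h1, by omega⟩, h3⟩
  · rintro ⟨⟨h1, h2⟩, h3⟩; exact ⟨⟨h1, by omega⟩, h3⟩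
lemma pvOfList_massesA (s : List Int) (hs : s.Pairwise (· ≤ ·)) (i : Int)
    (h0 : 0 ≤ i) (h1 : i < (s.length : Int)) :
    PySem.Set.ofList (pvMassesA s i) = pvF s (PySem.List.pyGetD s i 0) := by
  have hF_nodup : (pvF s (PySem.List.pyGetD s i 0)).Nodup :=
    List.Nodup.filter _ (PySem.List.nodup_pyRange_one 57 201)
  have hA_pl : (pvMassesA s i).Pairwise (· ≤ ·) := by
    unfold pvMassesA
    rw [List.pairwise_map]
    have hpw := (PySem.List.pairwise_lt_pyRange_one i (PySem.List.len s)).filter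
      (fun j => decide (pvInR (PySem.List.pyGetD s j 0 - PySem.List.pyGetD s i 0)))
    refine hpw.imp_of_mem ?_
    intro a b ha hb hab
    have ha' := PySem.List.mem_pyRange_one.mp (List.mem_of_mem_filter ha)
    have hb' := PySem.List.mem_pyRange_one.mp (List.mem_of_mem_filter hb)
    have := pvSorted_getD_mono s hs a b (le_trans h0 ha'.1) (le_of_lt hab)
      (by rw [PySem.List.len_eq] at hb'; exact hb'.2)
    omega
  have hA_pl' : (PySem.Set.ofList (pvMassesA s i)).Pairwise (· < ·) :=
    pvPairwise_lt_of_le_nodup _ (hA_pl.sublist (pvOfList_sublist _)) (PySem.Set.nodup_ofList _)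
  have hF_pl : (pvF s (PySem.List.pyGetD s i 0)).Pairwise (· < ·) :=
    (PySem.List.pairwise_lt_pyRange_one 57 201).filter _
  apply pvEq_of_perm_lt _ _ ?_ hA_pl' hF_pl
  rw [List.perm_ext_iff_of_nodup (PySem.Set.nodup_ofList _) hF_nodup]
  intro a
  rw [PySem.Set.mem_ofList, pvMem_massesA s hs i h0 h1, pvMem_F]
-- counting: per-i block counts k exactly count(s, s_i + k) times, for admissible k
lemma pvCount_massesA (s : List Int) (hs : s.Pairwise (· ≤ ·)) (i : Int)
    (h0 : 0 ≤ i) (h1 : i < (s.length : Int)) (k : Int) (hk : pvInR k) :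
    (pvMassesA s i).count k = s.count (PySem.List.pyGetD s i 0 + k) := by
  obtain ⟨hk1, hk2⟩ := hk
  unfold pvMassesA
  rw [List.count_eq_countP, List.countP_map, List.countP_filter]
  rw [List.countP_congr (q := fun j =>
      PySem.List.pyGetD s j 0 == PySem.List.pyGetD s i 0 + k) ?_]
  · have hcnt : ∀ c : Int, s.count c
        = List.countP (fun j => PySem.List.pyGetD s j 0 == c)
            (PySem.List.pyRange 0 (PySem.List.len s) 1) := by
      intro c
      conv_lhs => rw [← PySem.List.map_pyGetD_pyRange_zero s 0]
      rw [List.count_eq_countP, List.countP_map]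
      rfl
    have hsplit := PySem.List.pyRange_one_append 0 i (PySem.List.len s) h0
      (by rw [PySem.List.len_eq]; omega)
    have hzero : List.countP (fun j =>
        PySem.List.pyGetD s j 0 == PySem.List.pyGetD s i 0 + k) (PySem.List.pyRange 0 i 1) = 0 := by
      rw [List.countP_eq_zero]
      intro j hj
      rw [PySem.List.mem_pyRange_one] at hj
      have hle := pvSorted_getD_mono s hs j i hj.1 (le_of_lt hj.2) h1
      simp only [beq_iff_eq]
      omega
    rw [hcnt (PySem.List.pyGetD s i 0 + k), hsplit, List.countP_append, hzero, Nat.zero_add]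
  · intro j hj
    simp only [Function.comp, beq_iff_eq, decide_eq_true_eq, Bool.and_eq_true, pvInR]
    constructor
    · rintro ⟨he, -⟩; omega
    · intro he; refine ⟨by omega, by omega, by omega⟩
lemma pvWgt_append (L1 L2 : List (Int × Int)) (k : Int) :
    pvWgt (L1 ++ L2) k = pvWgt L1 k + pvWgt L2 k := by
  simp [pvWgt, List.filter_append]

lemma pvWgt_flatMap {β : Type} (is : List β) (g : β → List (Int × Int)) (k : Int) :
    pvWgt (is.flatMap g) k = (is.map (fun i => pvWgt (g i) k)).sum := by
  induction is with
  | nil => simp [pvWgt]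
  | cons i is ih => simp [List.flatMap_cons, pvWgt_append, ih]

lemma pvWgt_map_pair_one (l : List Int) (k : Int) :
    pvWgt (l.map (fun m => (m, (1 : Int)))) k = (l.count k : Int) := by
  unfold pvWgt
  rw [List.filter_map, List.map_map]
  simp only [Function.comp_def]
  rw [List.filter_beq, List.map_replicate, List.sum_replicate]
  simp
lemma pvWgt_blockB (s : List Int) (v k : Int) (hk : pvInR k) :
    pvWgt ((pvF s v).map (fun m => (m, pvCnt s v * pvCnt s (v + m)))) k
      = pvCnt s v * pvCnt s (v + k) := by
  have hF_nodup : (pvF s v).Nodup := List.Nodup.filter _ (PySem.List.nodup_pyRange_one 57 201)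
  unfold pvWgt
  rw [List.filter_map, List.map_map]
  simp only [Function.comp_def]
  rw [List.filter_beq, List.map_replicate, List.sum_replicate]
  by_cases hkF : k ∈ pvF s v
  · rw [List.count_eq_one_of_mem hF_nodup hkF]
    simp
  · rw [List.count_eq_zero.mpr hkF]
    have hns : (v + k) ∉ s := fun hm => hkF ((pvMem_F s v k).mpr ⟨hk, hm⟩)
    unfold pvCnt
    rw [List.count_eq_zero.mpr hns]
    simp
-- grouping a sum over elements by distinct values
lemma pvSum_if_single (l : List Int) (hn : l.Nodup) (a : Int) (ha : a ∈ l) (c : Int) :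
    (l.map (fun v => if v = a then c else 0)).sum = c := by
  induction l with
  | nil => simp at ha
  | cons x l ih =>
    have hn' := List.nodup_cons.mp hn
    simp only [List.map_cons, List.sum_cons]
    rcases List.mem_cons.mp ha with h | h
    · subst h
      rw [if_pos rfl]
      have hz : (l.map (fun v => if v = a then c else 0)).sum = 0 := by
        apply List.sum_eq_zero
        intro y hy
        rcases List.mem_map.mp hy with ⟨v, hv, rfl⟩
        have : v ≠ a := fun e => hn'.1 (e ▸ hv)
        simp [this]
      rw [hz]; ring
    · have hxa : x ≠ a := by rintro rfl; exact (List.nodup_cons.mp hn).1 h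
      rw [if_neg hxa, ih (List.nodup_cons.mp hn).2 h]
      ring

lemma pvGroup (xs : List Int) (g : Int → Int) :
    (xs.map g).sum = ((PySem.Set.ofList xs).map (fun v => (xs.count v : Int) * g v)).sum := by
  induction xs using List.reverseRecOn with
  | nil => simp [PySem.Set.ofList]
  | append_singleton xs a ih =>
    rw [List.map_append, List.sum_append, ih, PySem.Set.ofList_append_singleton]
    by_cases h : a ∈ PySem.Set.ofList xs
    · rw [PySem.Set.add_of_mem h]
      have hmc : ((PySem.Set.ofList xs).map (fun v => ((xs ++ [a]).count v : Int) * g v))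
          = (PySem.Set.ofList xs).map
              (fun v => (xs.count v : Int) * g v + (if v = a then g a else 0)) := by
        apply List.map_congr_left
        intro v hv
        rw [List.count_append]
        by_cases hva : v = a
        · subst hva; simp; ring
        · simp [Ne.symm hva, hva]
      rw [hmc, PySem.List.sum_map_add_int,
        pvSum_if_single _ (PySem.Set.nodup_ofList xs) a h (g a)]
      simp
    · rw [PySem.Set.add_of_not_mem h, List.map_append, List.sum_append]
      have ha : a ∉ xs := fun hx => h ((PySem.Set.mem_ofList xs a).mpr hx)
      have h1 : ((PySem.Set.ofList xs).map (fun v => ((xs ++ [a]).count v : Int) * g v))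
          = (PySem.Set.ofList xs).map (fun v => (xs.count v : Int) * g v) := by
        apply List.map_congr_left
        intro v hv
        have hva : v ≠ a := fun e => ha (e ▸ (PySem.Set.mem_ofList xs v).mp hv)
        rw [List.count_append]
        simp [Ne.symm hva]
      rw [h1]
      simp [List.count_eq_zero.mpr ha]
-- set-update plumbing
lemma pvUpdate_of_subset (s : PySem.Set Int) (l : List Int) (h : ∀ x ∈ l, x ∈ s) :
    PySem.Set.update s l = s := by
  rw [PySem.Set.update_eq_append_filter]
  have : List.filter (fun y => !s.contains y) (PySem.Set.ofList l) = [] := by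
    rw [List.filter_eq_nil_iff]
    intro y hy
    simp [h y ((PySem.Set.mem_ofList l y).mp hy)]
  rw [this, List.append_nil]

lemma pvUpdate_ofList (s : PySem.Set Int) (xs : List Int) :
    PySem.Set.update s (PySem.Set.ofList xs) = PySem.Set.update s xs := by
  rw [PySem.Set.update_eq_append_filter, PySem.Set.update_eq_append_filter,
    PySem.Set.ofList_ofList]

lemma pvUpdate_flatMap {β : Type} (is : List β) (g : β → List Int) (S : PySem.Set Int) :
    PySem.Set.update S (is.flatMap g) = is.foldl (fun S i => PySem.Set.update S (g i)) S := by
  induction is generalizing S with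
  | nil => simp [PySem.Set.update_nil]
  | cons i is ih => rw [List.flatMap_cons, PySem.Set.update_append, List.foldl_cons, ih]

lemma pvMem_foldl_update (G : Int → List Int) (xs : List Int) (S : PySem.Set Int) (y : Int) :
    y ∈ xs.foldl (fun S v => PySem.Set.update S (G v)) S ↔ y ∈ S ∨ ∃ v ∈ xs, y ∈ G v := by
  induction xs generalizing S with
  | nil => simp
  | cons x xs ih =>
    rw [List.foldl_cons, ih]
    rw [PySem.Set.mem_update]
    constructor
    · rintro (⟨h | h⟩ | ⟨v, hv, h⟩)
      · exact Or.inl h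
      · exact Or.inr ⟨x, List.mem_cons_self, h⟩
      · exact Or.inr ⟨v, List.mem_cons_of_mem _ hv, h⟩
    · rintro (h | ⟨v, hv, h⟩)
      · exact Or.inl (Or.inl h)
      · rcases List.mem_cons.mp hv with rfl | hv
        · exact Or.inl (Or.inr h)
        · exact Or.inr ⟨v, hv, h⟩

lemma pvFoldl_update_ofList (G : Int → List Int) (xs : List Int) (S : PySem.Set Int) :
    xs.foldl (fun S v => PySem.Set.update S (G v)) S
      = (PySem.Set.ofList xs).foldl (fun S v => PySem.Set.update S (G v)) S := by
  induction xs using List.reverseRecOn generalizing S with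
  | nil => simp [PySem.Set.ofList]
  | append_singleton xs a ih =>
    rw [List.foldl_append, PySem.Set.ofList_append_singleton, ih]
    by_cases h : a ∈ PySem.Set.ofList xs
    · rw [PySem.Set.add_of_mem h]
      simp only [List.foldl_cons, List.foldl_nil]
      apply pvUpdate_of_subset
      intro x hx
      rw [pvMem_foldl_update]
      exact Or.inr ⟨a, h, hx⟩
    · rw [PySem.Set.add_of_not_mem h, List.foldl_append]-- the last element of a (≤)-sorted list is maximal: shifting it by m ≥ 57 leaves the list
lemma pvLast_not_mem (s : List Int) (hs : s.Pairwise (· ≤ ·)) (hnil : s ≠ []) (m : Int)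
    (hm : 57 ≤ m) : (PySem.List.pyGetD s (PySem.List.len s - 1) 0 + m) ∉ s := by
  intro hmem
  obtain ⟨t, ht, hst⟩ := List.mem_iff_getElem.mp hmem
  have hlen : 0 < s.length := List.length_pos_iff.mpr hnil
  have hg : PySem.List.pyGetD s (t : Int) 0 = s[t] := by
    rw [PySem.List.pyGetD_eq_getElem s 0 (by omega) (by exact_mod_cast ht)]
    simp
  have hmono := pvSorted_getD_mono s hs (t : Int) (PySem.List.len s - 1) (by omega)
    (by rw [PySem.List.len_eq]; omega) (by rw [PySem.List.len_eq]; omega)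
  rw [hg, hst] at hmono
  omega

lemma pvF_last_nil (s : List Int) (hs : s.Pairwise (· ≤ ·)) (hnil : s ≠ []) :
    pvF s (PySem.List.pyGetD s (PySem.List.len s - 1) 0) = [] := by
  unfold pvF
  rw [List.filter_eq_nil_iff]
  intro m hm
  rw [PySem.List.mem_pyRange_one] at hm
  simp only [decide_eq_true_eq]
  exact pvLast_not_mem s hs hnil m hm.1

-- the two keysets coincide
lemma pvA_shape (spectrr : List Int) :
    gtpktspectrl spectrr
      = (pvBump PySem.Dict.empty (pvLA (PySem.List.sorted spectrr (fun x => x) false))).items := by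
  simp only [gtpktspectrl]
  set s := PySem.List.sorted spectrr (fun x => x) false with hsdef
  congr 1
  have hinner : ∀ (d : PySem.Dict Int Int) (i : Int),
      (PySem.List.pyRange i (PySem.List.len s) 1).foldl (fun d j =>
        if PySem.List.pyGetD s j 0 - PySem.List.pyGetD s i 0 < 57 ∨
            PySem.List.pyGetD s j 0 - PySem.List.pyGetD s i 0 > 200 then d
        else if d.contains (PySem.List.pyGetD s j 0 - PySem.List.pyGetD s i 0) then
          d.insert (PySem.List.pyGetD s j 0 - PySem.List.pyGetD s i 0)
            (d.getD (PySem.List.pyGetD s j 0 - PySem.List.pyGetD s i 0) 0 + 1)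
        else d.insert (PySem.List.pyGetD s j 0 - PySem.List.pyGetD s i 0) 1) d
      = pvBump d ((pvMassesA s i).map (fun m => (m, (1 : Int)))) := by
    intro d i
    have hbody : (fun (d : PySem.Dict Int Int) (j : Int) =>
        if PySem.List.pyGetD s j 0 - PySem.List.pyGetD s i 0 < 57 ∨
            PySem.List.pyGetD s j 0 - PySem.List.pyGetD s i 0 > 200 then d
        else if d.contains (PySem.List.pyGetD s j 0 - PySem.List.pyGetD s i 0) then
          d.insert (PySem.List.pyGetD s j 0 - PySem.List.pyGetD s i 0)
            (d.getD (PySem.List.pyGetD s j 0 - PySem.List.pyGetD s i 0) 0 + 1)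
        else d.insert (PySem.List.pyGetD s j 0 - PySem.List.pyGetD s i 0) 1)
        = (fun (d : PySem.Dict Int Int) (j : Int) =>
        if decide (pvInR (PySem.List.pyGetD s j 0 - PySem.List.pyGetD s i 0)) = true then
          d.insert (PySem.List.pyGetD s j 0 - PySem.List.pyGetD s i 0)
            (d.getD (PySem.List.pyGetD s j 0 - PySem.List.pyGetD s i 0) 0 + 1)
        else d) := by
      funext d j
      by_cases hr : PySem.List.pyGetD s j 0 - PySem.List.pyGetD s i 0 < 57 ∨
          PySem.List.pyGetD s j 0 - PySem.List.pyGetD s i 0 > 200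
      · rw [if_pos hr, if_neg (show ¬ (decide (pvInR (PySem.List.pyGetD s j 0 -
            PySem.List.pyGetD s i 0)) = true) by
          simp only [decide_eq_true_eq, pvInR]; omega)]
      · rw [if_neg hr, if_pos (show decide (pvInR (PySem.List.pyGetD s j 0 -
            PySem.List.pyGetD s i 0)) = true by
          simp only [decide_eq_true_eq, pvInR]; omega)]
        by_cases hc : d.contains (PySem.List.pyGetD s j 0 - PySem.List.pyGetD s i 0)
        · rw [if_pos hc]
        · rw [if_neg hc,
            PySem.Dict.getD_of_not_contains d 0 (eq_false_of_ne_true hc)]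
          norm_num
    rw [hbody]
    unfold pvBump pvMassesA
    rw [List.map_map, List.foldl_map]
    exact PySem.List.foldl_if_eq_foldl_filter _ _ _ _
  have houter : (fun (d : PySem.Dict Int Int) (i : Int) =>
      (PySem.List.pyRange i (PySem.List.len s) 1).foldl (fun d j =>
        if PySem.List.pyGetD s j 0 - PySem.List.pyGetD s i 0 < 57 ∨
            PySem.List.pyGetD s j 0 - PySem.List.pyGetD s i 0 > 200 then d
        else if d.contains (PySem.List.pyGetD s j 0 - PySem.List.pyGetD s i 0) then
          d.insert (PySem.List.pyGetD s j 0 - PySem.List.pyGetD s i 0)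
            (d.getD (PySem.List.pyGetD s j 0 - PySem.List.pyGetD s i 0) 0 + 1)
        else d.insert (PySem.List.pyGetD s j 0 - PySem.List.pyGetD s i 0) 1) d)
      = (fun (d : PySem.Dict Int Int) (i : Int) =>
          pvBump d ((pvMassesA s i).map (fun m => (m, (1 : Int))))) := by
    funext d i
    exact hinner d i
  rw [houter, pvBump_flatMap]
  rfl

lemma pvB_shape (spectrr : List Int) :
    gtpktspectrl_alt spectrr
      = (pvBump PySem.Dict.empty (pvLB (PySem.List.sorted spectrr (fun x => x) false))).items := by
  simp only [gtpktspectrl_alt, PySem.Dict.foldl_insert_getD_add_one_eq_counter]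
  set s := PySem.List.sorted spectrr (fun x => x) false with hsdef
  have hperm : s.Perm spectrr := PySem.List.sorted_perm spectrr (fun x => x) false
  have hs : s.Pairwise (· ≤ ·) := PySem.List.sorted_pairwise spectrr (fun x => x)
  congr 1
  have hmem : ∀ x : Int, x ∈ spectrr ↔ x ∈ s := fun x => (hperm.mem_iff).symm
  have hcnt : ∀ x : Int, (PySem.Dict.counter spectrr).getD x 0 = pvCnt s x := by
    intro x
    rw [PySem.Dict.getD_counter, pvCnt, (hperm.count_eq x)]
  -- the sorted key list is the ascending list of distinct values of s
  have houterlist : PySem.List.sorted (PySem.Dict.counter spectrr).keys (fun x => x) false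
      = PySem.Set.ofList s := by
    rw [PySem.Dict.keys_counter]
    apply PySem.List.sorted_eq_of_perm_of_pairwise_lt
    · rw [List.perm_ext_iff_of_nodup (PySem.Set.nodup_ofList _) (PySem.Set.nodup_ofList _)]
      intro a
      rw [PySem.Set.mem_ofList, PySem.Set.mem_ofList, hmem]
    · exact pvPairwise_lt_of_le_nodup _ (hs.sublist (pvOfList_sublist s)) (PySem.Set.nodup_ofList s)
  rw [houterlist]
  have hinner : ∀ (d : PySem.Dict Int Int) (v : Int),
      (PySem.List.pyRange 57 201 1).foldl (fun d mass =>
        match (PySem.Dict.counter spectrr).get? (v + mass) with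
        | none => d
        | some w => d.insert mass (d.getD mass 0 + (PySem.Dict.counter spectrr).getD v 0 * w)) d
      = pvBump d ((pvF s v).map (fun m => (m, pvCnt s v * pvCnt s (v + m)))) := by
    intro d v
    have hbody : (fun (d : PySem.Dict Int Int) (mass : Int) =>
        match (PySem.Dict.counter spectrr).get? (v + mass) with
        | none => d
        | some w => d.insert mass (d.getD mass 0 + (PySem.Dict.counter spectrr).getD v 0 * w))
        = (fun (d : PySem.Dict Int Int) (mass : Int) =>
            if decide ((v + mass) ∈ s) = true then
              d.insert mass (d.getD mass 0 + pvCnt s v * pvCnt s (v + mass)) else d) := by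
      funext d mass
      cases hg : (PySem.Dict.counter spectrr).get? (v + mass) with
      | none =>
        have hc : (PySem.Dict.counter spectrr).contains (v + mass) = false := by
          rw [PySem.Dict.contains_eq_isSome_get?, hg]; rfl
        rw [PySem.Dict.contains_counter] at hc
        have : (v + mass) ∉ s := by
          rw [← hmem]
          simpa using hc
        rw [if_neg (by simpa using this)]
      | some w =>
        have hw : (PySem.Dict.counter spectrr).getD (v + mass) 0 = w :=
          PySem.Dict.getD_of_get?_eq_some _ 0 hg
        have hc : (PySem.Dict.counter spectrr).contains (v + mass) = true := by
          rw [PySem.Dict.contains_eq_isSome_get?, hg]; rfl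
        rw [PySem.Dict.contains_counter] at hc
        have hms : (v + mass) ∈ s := by
          rw [← hmem]
          simpa using hc
        rw [if_pos (by simpa using hms), ← hw, hcnt (v + mass), hcnt v]
    rw [hbody]
    unfold pvBump pvF
    rw [List.foldl_map]
    exact PySem.List.foldl_if_eq_foldl_filter _ _ _ _
  have houter : (fun (d : PySem.Dict Int Int) (v : Int) =>
      (PySem.List.pyRange 57 201 1).foldl (fun d mass =>
        match (PySem.Dict.counter spectrr).get? (v + mass) with
        | none => d
        | some w => d.insert mass (d.getD mass 0 + (PySem.Dict.counter spectrr).getD v 0 * w)) d)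
      = (fun (d : PySem.Dict Int Int) (v : Int) =>
          pvBump d ((pvF s v).map (fun m => (m, pvCnt s v * pvCnt s (v + m))))) := by
    funext d v
    exact hinner d v
  rw [houter, pvBump_flatMap]
  rfl
-- ofList is a sublist, hence inherits pairwise facts
lemma pvKeys_eq (s : List Int) (hs : s.Pairwise (· ≤ ·)) :
    PySem.Set.ofList ((pvLA s).map Prod.fst) = PySem.Set.ofList ((pvLB s).map Prod.fst) := by
  by_cases hnil : s = []
  · subst hnil
    rfl
  have hlen : 0 < s.length := List.length_pos_iff.mpr hnil
  have hLA : (pvLA s).map Prod.fst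
      = (PySem.List.pyRange 0 (PySem.List.len s - 1) 1).flatMap (fun i => pvMassesA s i) := by
    simp [pvLA, List.map_flatMap, List.map_map, Function.comp_def]
  have hLB : (pvLB s).map Prod.fst = (PySem.Set.ofList s).flatMap (fun v => pvF s v) := by
    simp [pvLB, List.map_flatMap, List.map_map, Function.comp_def]
  have e1 : PySem.Set.ofList ((PySem.List.pyRange 0 (PySem.List.len s - 1) 1).flatMap
        (fun i => pvMassesA s i))
      = (PySem.List.pyRange 0 (PySem.List.len s - 1) 1).foldl
        (fun S i => PySem.Set.update S (pvMassesA s i)) [] := by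
    rw [← PySem.Set.update_empty, pvUpdate_flatMap]
    rfl
  have e2 : PySem.Set.ofList ((PySem.Set.ofList s).flatMap (fun v => pvF s v))
      = (PySem.Set.ofList s).foldl (fun S v => PySem.Set.update S (pvF s v)) [] := by
    rw [← PySem.Set.update_empty, pvUpdate_flatMap]
    rfl
  rw [hLA, hLB, e1, e2]
  have hblk : (PySem.List.pyRange 0 (PySem.List.len s - 1) 1).foldl
      (fun S i => PySem.Set.update S (pvMassesA s i)) []
      = (PySem.List.pyRange 0 (PySem.List.len s - 1) 1).foldl
      (fun S i => PySem.Set.update S (pvF s (PySem.List.pyGetD s i 0))) [] := by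
    apply PySem.List.foldl_congr_mem
    intro S i hi
    rw [PySem.List.mem_pyRange_one] at hi
    rw [← pvUpdate_ofList,
      pvOfList_massesA s hs i hi.1 (by rw [PySem.List.len_eq] at hi; omega)]
  have h1 : (0 : Int) ≤ PySem.List.len s - 1 := by rw [PySem.List.len_eq]; omega
  have h2 : PySem.List.pyRange 0 (PySem.List.len s) 1
      = PySem.List.pyRange 0 (PySem.List.len s - 1) 1 ++ [PySem.List.len s - 1] := by
    have := PySem.List.pyRange_one_succ_right (a := 0) (b := PySem.List.len s - 1) h1
    rw [show PySem.List.len s - 1 + 1 = PySem.List.len s by ring] at this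
    exact this
  have hext : (PySem.List.pyRange 0 (PySem.List.len s - 1) 1).foldl
      (fun S i => PySem.Set.update S (pvF s (PySem.List.pyGetD s i 0))) []
      = (PySem.List.pyRange 0 (PySem.List.len s) 1).foldl
      (fun S i => PySem.Set.update S (pvF s (PySem.List.pyGetD s i 0))) [] := by
    rw [h2, List.foldl_append]
    simp only [List.foldl_cons, List.foldl_nil]
    rw [pvF_last_nil s hs hnil, PySem.Set.update_nil]
  have hval : (PySem.List.pyRange 0 (PySem.List.len s) 1).foldl
      (fun S i => PySem.Set.update S (pvF s (PySem.List.pyGetD s i 0))) []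
      = s.foldl (fun S v => PySem.Set.update S (pvF s v)) [] := by
    have := PySem.List.foldl_pyRange_pyGetD s 0
      (fun S v => PySem.Set.update S (pvF s v)) [] (a := 0) le_rfl
    simpa using this
  rw [hblk, hext, hval, pvFoldl_update_ofList]
-- the weights coincide on admissible masses
lemma pvWgt_eq (s : List Int) (hs : s.Pairwise (· ≤ ·)) (k : Int) (hk : pvInR k) :
    pvWgt (pvLA s) k = pvWgt (pvLB s) k := by
  by_cases hnil : s = []
  · subst hnil
    rfl
  have hlen : 0 < s.length := List.length_pos_iff.mpr hnil
  unfold pvLA pvLB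
  rw [pvWgt_flatMap, pvWgt_flatMap]
  have hA1 : (PySem.List.pyRange 0 (PySem.List.len s - 1) 1).map
      (fun i => pvWgt ((pvMassesA s i).map (fun m => (m, (1 : Int)))) k)
      = (PySem.List.pyRange 0 (PySem.List.len s - 1) 1).map
      (fun i => ((s.count (PySem.List.pyGetD s i 0 + k) : Int))) := by
    apply List.map_congr_left
    intro i hi
    rw [PySem.List.mem_pyRange_one] at hi
    rw [pvWgt_map_pair_one,
      pvCount_massesA s hs i hi.1 (by rw [PySem.List.len_eq] at hi; omega) k hk]
  have hB1 : (PySem.Set.ofList s).map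
      (fun v => pvWgt ((pvF s v).map (fun m => (m, pvCnt s v * pvCnt s (v + m)))) k)
      = (PySem.Set.ofList s).map (fun v => pvCnt s v * pvCnt s (v + k)) :=
    List.map_congr_left (fun v _ => pvWgt_blockB s v k hk)
  rw [hA1, hB1]
  have h1 : (0 : Int) ≤ PySem.List.len s - 1 := by rw [PySem.List.len_eq]; omega
  have h2 : PySem.List.pyRange 0 (PySem.List.len s) 1
      = PySem.List.pyRange 0 (PySem.List.len s - 1) 1 ++ [PySem.List.len s - 1] := by
    have := PySem.List.pyRange_one_succ_right (a := 0) (b := PySem.List.len s - 1) h1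
    rw [show PySem.List.len s - 1 + 1 = PySem.List.len s by ring] at this
    exact this
  have hlastc : ((s.count (PySem.List.pyGetD s (PySem.List.len s - 1) 0 + k) : Int)) = 0 := by
    norm_cast
    rw [List.count_eq_zero]
    exact pvLast_not_mem s hs hnil k hk.1
  have hmap : ∀ G : Int → Int,
      ((PySem.List.pyRange 0 (PySem.List.len s) 1).map
        (fun i => G (PySem.List.pyGetD s i 0))) = s.map G := by
    intro G
    conv_rhs => rw [← PySem.List.map_pyGetD_pyRange_zero s 0]
    rw [List.map_map]
    rfl
  calc ((PySem.List.pyRange 0 (PySem.List.len s - 1) 1).map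
        (fun i => ((s.count (PySem.List.pyGetD s i 0 + k) : Int)))).sum
      = ((PySem.List.pyRange 0 (PySem.List.len s) 1).map
        (fun i => ((s.count (PySem.List.pyGetD s i 0 + k) : Int)))).sum := by
        rw [h2, List.map_append, List.sum_append]
        simp only [List.map_cons, List.map_nil, List.sum_cons, List.sum_nil]
        rw [hlastc]
        ring
    _ = (s.map (fun x => ((s.count (x + k) : Int)))).sum :=
        congrArg List.sum (hmap (fun x => ((s.count (x + k) : Int))))
    _ = ((PySem.Set.ofList s).map
          (fun v => ((s.count v : Int)) * ((s.count (v + k) : Int)))).sum :=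
        pvGroup s (fun x => ((s.count (x + k) : Int)))
    _ = ((PySem.Set.ofList s).map (fun v => pvCnt s v * pvCnt s (v + k))).sum := rfl
lemma pvLA_fst_inR (s : List Int) (k : Int) (hk : k ∈ (pvLA s).map Prod.fst) : pvInR k := by
  simp only [pvLA, List.map_flatMap, List.map_map, Function.comp_def] at hk
  rw [List.mem_flatMap] at hk
  obtain ⟨i, _, hmem⟩ := hk
  rw [List.mem_map] at hmem
  obtain ⟨mm, hmm, hemm⟩ := hmem
  unfold pvMassesA at hmm
  rw [List.mem_map] at hmm
  obtain ⟨j, hj, rfl⟩ := hmm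
  have := (List.mem_filter.mp hj).2
  simp only [decide_eq_true_eq] at this
  simpa [← hemm] using this
-- ===== VERDICT (by name: the statement is the Claim_ definition above) =====
theorem gtpktspectrl_spec : Claim_equal_gtpktspectrl := by
  intro spectrr _
  unfold Spec_gtpktspectrl
  rw [pvA_shape, pvB_shape]
  set s := PySem.List.sorted spectrr (fun x => x) false with hsdef
  have hs : s.Pairwise (· ≤ ·) := PySem.List.sorted_pairwise spectrr (fun x => x)
  rw [pvBump_items, pvBump_items]
  have hfun : (PySem.Set.ofList ((pvLA s).map Prod.fst)).map (fun k => (k, pvWgt (pvLA s) k))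
      = (PySem.Set.ofList ((pvLA s).map Prod.fst)).map (fun k => (k, pvWgt (pvLB s) k)) := by
    apply List.map_congr_left
    intro k hk
    have hkR : pvInR k := pvLA_fst_inR s k ((PySem.Set.mem_ofList _ k).mp hk)
    rw [pvWgt_eq s hs k hkR]
  rw [hfun, pvKeys_eq s hs]
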